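-- pv_equiv track=rewrite | github.com/packetmaven/bean_vulnerable | src/core/advanced_feature_engineering.py | _count_security_imports
-- ===== SOURCE A (Python) =====
-- def _count_security_imports(code: str) -> int:
--     """Count security-related imports"""
--
--     security_packages = [
--         'java.sql', 'javax.servlet', 'java.io', 'java.net',
--         'java.security', 'javax.crypto', 'java.util.regex'
--     ]
--
--     count = 0
--     for package in security_packages:
--         count += code.count(f'import {package}')
--
--     return count
-- ===== SOURCE B (Python) =====
-- def _count_security_imports(code: str) -> int:
--     """Count security-related imports (single left-to-right position scan)."""
--     targets = ('import java.sql', 'import javax.servlet', 'import java.io',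
--                'import java.net', 'import java.security', 'import javax.crypto',
--                'import java.util.regex')
--     return sum(1 for i in range(len(code)) if code.startswith(targets, i))
-- ===== Notes on version B (the rewrite author's own statement) =====
-- stated objective: alternative
-- what changed: Replaced seven independent str.count substring passes with a single left-to-right scan that counts positions where the code starts with any of the seven precomputed import-package targets (correct because the targets are pairwise non-prefix and self-overlap-free).
import Mathlib
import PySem

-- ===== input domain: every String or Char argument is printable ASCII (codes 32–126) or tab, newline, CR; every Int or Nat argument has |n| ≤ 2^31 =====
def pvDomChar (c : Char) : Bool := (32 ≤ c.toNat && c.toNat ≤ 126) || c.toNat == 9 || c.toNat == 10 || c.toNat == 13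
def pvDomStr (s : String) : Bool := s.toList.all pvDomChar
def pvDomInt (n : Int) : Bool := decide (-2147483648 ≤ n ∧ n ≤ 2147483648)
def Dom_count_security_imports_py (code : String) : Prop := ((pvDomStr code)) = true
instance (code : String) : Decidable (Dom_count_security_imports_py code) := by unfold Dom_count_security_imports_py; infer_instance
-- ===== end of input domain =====

-- B replaces A's seven str.count passes by one left-to-right position scan over the string.

-- ===== PORT A =====
def securityPackages : List String :=
  ["java.sql", "javax.servlet", "java.io", "java.net",
   "java.security", "javax.crypto", "java.util.regex"]

def count_security_imports_py (code : String) : Int :=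
  securityPackages.foldl
    (fun count package => count + (PySem.Str.count code ("import " ++ package) : Int)) 0

-- ===== PORT B =====
def securityTargets : List (List Char) :=
  ["import java.sql".toList, "import javax.servlet".toList, "import java.io".toList,
   "import java.net".toList, "import java.security".toList, "import javax.crypto".toList,
   "import java.util.regex".toList]

-- one pass over the positions of the string: +1 where some target starts here
def scanTargets : List Char → Nat
  | [] => 0
  | c :: t =>
      (if securityTargets.any (fun p => p.isPrefixOf (c :: t)) then 1 else 0) + scanTargets t

def count_security_imports_py_alt (code : String) : Int :=
  (scanTargets code.toList : Int)

-- ===== PRECONDITION & SPEC =====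
def Spec_count_security_imports_py (code : String) (out : Int) : Prop := out = count_security_imports_py_alt code
instance (code : String) (out : Int) : Decidable (Spec_count_security_imports_py code out) := by unfold Spec_count_security_imports_py; infer_instance

-- ===== CLAIM (what is proved, stated in full; the proofs are below) =====
def Claim_equal_count_security_imports_py : Prop := ∀ (code : String), Dom_count_security_imports_py code → Spec_count_security_imports_py code (count_security_imports_py code)

-- ===== LEMMAS AND PROOFS =====

-- number of positions of cs at which sub starts
def occAt (sub : List Char) : List Char → Nat
  | [] => 0
  | c :: t => (if sub.isPrefixOf (c :: t) then 1 else 0) + occAt sub t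

-- sub has no nontrivial border (no self-overlapping occurrences)
def NoBorder (sub : List Char) : Prop :=
  ∀ j < sub.length, 0 < j → sub.take (sub.length - j) ≠ sub.drop j

lemma not_prefix_of_drop_append {sub rest : List Char} (hb : NoBorder sub) {j : Nat}
    (hj0 : 0 < j) (hj : j < sub.length) : ¬ sub <+: (sub.drop j ++ rest) := by
  rintro ⟨t, ht⟩
  apply hb j hj (by omega)
  have h1 : (sub ++ t).take (sub.length - j) = sub.take (sub.length - j) :=
    List.take_append_of_le_length (by omega)
  have h2 : ((sub.drop j ++ rest)).take (sub.length - j) = sub.drop j := by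
    rw [List.take_append_of_le_length (by simp)]
    exact List.take_of_length_le (by simp)
  rw [ht] at h1
  rw [h1] at h2
  exact h2

lemma occAt_drop_append {sub rest : List Char} (hb : NoBorder sub) :
    ∀ k, k < sub.length → occAt sub (sub.drop (sub.length - k) ++ rest) = occAt sub rest := by
  intro k
  induction k with
  | zero => intro _; simp [List.drop_length]
  | succ k ih =>
      intro hk
      set j := sub.length - (k + 1) with hjdef
      have hj : j < sub.length := by omega
      have hcons : sub.drop j = sub[j] :: sub.drop (j + 1) := List.drop_eq_getElem_cons hj
      have hJ1 : j + 1 = sub.length - k := by omega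
      rw [hcons]
      show occAt sub (sub[j] :: (sub.drop (j+1) ++ rest)) = occAt sub rest
      have hnp : ¬ sub.isPrefixOf (sub[j] :: (sub.drop (j+1) ++ rest)) = true := by
        rw [List.isPrefixOf_iff_prefix]
        have := not_prefix_of_drop_append (rest := rest) hb (j := j) (by omega) hj
        rwa [hcons] at this
      simp only [occAt, if_neg hnp, Nat.zero_add]
      rw [hJ1]
      exact ih (by omega)

lemma occAt_of_prefix {sub l : List Char} (hb : NoBorder sub) (hne : sub ≠ [])
    (h : sub <+: l) : occAt sub l = 1 + occAt sub (l.drop sub.length) := by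
  obtain ⟨rest, rfl⟩ := h
  obtain ⟨c, st, rfl⟩ : ∃ c st, sub = c :: st := by
    cases sub with
    | nil => exact absurd rfl hne
    | cons c st => exact ⟨c, st, rfl⟩
  rw [List.drop_left]
  have hpref : (c :: st).isPrefixOf ((c :: st) ++ rest) = true := by
    rw [List.isPrefixOf_iff_prefix]; exact List.prefix_append _ _
  show occAt (c :: st) (c :: (st ++ rest)) = 1 + occAt (c :: st) rest
  simp only [occAt]
  rw [if_pos (by simp)]
  congr 1
  have := occAt_drop_append (sub := c :: st) (rest := rest) hb
    ((c :: st).length - 1) (by simp)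
  have hd : (c :: st).length - ((c :: st).length - 1) = 1 := by simp
  rw [hd] at this
  simpa using this

lemma count_go_eq_occAt {sub : List Char} (hb : NoBorder sub) (hne : sub ≠ []) :
    ∀ fuel l acc, l.length ≤ fuel →
      PySem.Chars.count.go sub fuel l acc = acc + occAt sub l := by
  intro fuel
  induction fuel with
  | zero =>
      intro l acc hl
      have : l = [] := List.eq_nil_of_length_eq_zero (by omega)
      subst this; simp [PySem.Chars.count.go, occAt]
  | succ fuel ih =>
      intro l acc hl
      cases l with
      | nil => simp [PySem.Chars.count.go, occAt]
      | cons c t =>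
          by_cases hp : sub.isPrefixOf (c :: t) = true
          · have hpre : sub <+: (c :: t) := List.isPrefixOf_iff_prefix.mp hp
            have hs : 0 < sub.length := List.length_pos_iff.mpr hne
            have hlen : ((c :: t).drop sub.length).length ≤ fuel := by
              simp only [List.length_drop, List.length_cons]
              simp only [List.length_cons] at hl
              omega
            rw [show PySem.Chars.count.go sub (fuel + 1) (c :: t) acc
                  = PySem.Chars.count.go sub fuel ((c :: t).drop sub.length) (acc + 1) by
                  simp [PySem.Chars.count.go, hp]]
            rw [ih _ _ hlen, occAt_of_prefix hb hne hpre]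
            omega
          · rw [show PySem.Chars.count.go sub (fuel + 1) (c :: t) acc
                  = PySem.Chars.count.go sub fuel t acc by
                  simp [PySem.Chars.count.go, hp]]
            rw [ih t acc (by simp at hl; omega)]
            simp only [occAt, if_neg hp]
            omega

lemma chars_count_eq_occAt {sub : List Char} (hb : NoBorder sub) (hne : sub ≠ []) (cs : List Char) :
    PySem.Chars.count cs sub = occAt sub cs := by
  rw [PySem.Chars.count, if_neg (by simpa [List.isEmpty_iff] using hne)]
  have h0 := count_go_eq_occAt hb hne cs.length cs 0 le_rfl
  omega

-- mutually exclusive targets: at each position at most one target matches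
lemma sum_ind_eq_any (ts : List (List Char))
    (h : ts.Pairwise (fun p q => ¬ p <+: q ∧ ¬ q <+: p)) (cs : List Char) :
    (ts.map (fun p => if p.isPrefixOf cs then (1:Nat) else 0)).sum
      = if ts.any (fun p => p.isPrefixOf cs) then 1 else 0 := by
  induction ts with
  | nil => simp
  | cons p ts ih =>
      rw [List.pairwise_cons] at h
      by_cases hp : p.isPrefixOf cs = true
      · have hrest : ∀ q ∈ ts, q.isPrefixOf cs = false := by
          intro q hq
          rw [Bool.eq_false_iff]
          intro hqp
          rcases List.prefix_or_prefix_of_prefix (List.isPrefixOf_iff_prefix.mp hp)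
              (List.isPrefixOf_iff_prefix.mp hqp) with hpq | hqp2
          · exact (h.1 q hq).1 hpq
          · exact (h.1 q hq).2 hqp2
        have hz : (ts.map (fun q => if q.isPrefixOf cs then (1:Nat) else 0)).sum = 0 := by
          apply List.sum_eq_zero
          intro x hx
          obtain ⟨q, hq, rfl⟩ := List.mem_map.mp hx
          simp [hrest q hq]
        simp only [List.map_cons, List.sum_cons, List.any_cons, hp, hz, Bool.true_or]
        simp
      · simp only [List.map_cons, List.sum_cons, List.any_cons,
          Bool.eq_false_iff.mpr hp, Bool.false_or]
        simpa using ih h.2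

lemma scanTargets_eq_sum (cs : List Char) :
    scanTargets cs = (securityTargets.map (fun p => occAt p cs)).sum := by
  induction cs with
  | nil => simp [scanTargets, securityTargets, occAt]
  | cons c t ih =>
      have hpw : securityTargets.Pairwise (fun p q => ¬ p <+: q ∧ ¬ q <+: p) := by decide
      simp only [scanTargets, ih]
      rw [← sum_ind_eq_any securityTargets hpw (c :: t)]
      simp only [securityTargets, List.map_cons, List.map_nil, List.sum_cons, List.sum_nil, occAt]
      omega

-- ===== VERDICT (by name: the statement is the Claim_ definition above) =====
theorem count_security_imports_py_spec : Claim_equal_count_security_imports_py := by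
  intro code _
  show count_security_imports_py code = count_security_imports_py_alt code
  unfold count_security_imports_py count_security_imports_py_alt
  rw [scanTargets_eq_sum]
  simp only [securityPackages, securityTargets, List.foldl_cons, List.foldl_nil,
    PySem.Str.count_eq, List.map_cons, List.map_nil, List.sum_cons, List.sum_nil]
  rw [show ("import " ++ "java.sql").toList = "import java.sql".toList by decide,
      show ("import " ++ "javax.servlet").toList = "import javax.servlet".toList by decide,
      show ("import " ++ "java.io").toList = "import java.io".toList by decide,
      show ("import " ++ "java.net").toList = "import java.net".toList by decide,
      show ("import " ++ "java.security").toList = "import java.security".toList by decide,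
      show ("import " ++ "javax.crypto").toList = "import javax.crypto".toList by decide,
      show ("import " ++ "java.util.regex").toList = "import java.util.regex".toList by decide,
      chars_count_eq_occAt (sub := "import java.sql".toList) (by unfold NoBorder; decide) (by decide),
      chars_count_eq_occAt (sub := "import javax.servlet".toList) (by unfold NoBorder; decide) (by decide),
      chars_count_eq_occAt (sub := "import java.io".toList) (by unfold NoBorder; decide) (by decide),
      chars_count_eq_occAt (sub := "import java.net".toList) (by unfold NoBorder; decide) (by decide),
      chars_count_eq_occAt (sub := "import java.security".toList) (by unfold NoBorder; decide) (by decide),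
      chars_count_eq_occAt (sub := "import javax.crypto".toList) (by unfold NoBorder; decide) (by decide),
      chars_count_eq_occAt (sub := "import java.util.regex".toList) (by unfold NoBorder; decide) (by decide)]
  push_cast
  ring
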